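-- pv_equiv track=rewrite | github.com/drewcassidy/quicktex | quicktex/image_utils.py | mip_sizes
-- ===== SOURCE A (Python) =====
-- import typing
-- import math
--
-- def mip_sizes(dimensions: typing.Tuple[int, int], mip_count: typing.Optional[int] = None) -> typing.List[typing.Tuple[int, int]]:
--     """
--     Create a chain of mipmap sizes for a given source source size, where each source is half the size of the one before.
--     Note that the division by 2 rounds down. So a 63x63 texture has as its next lowest mipmap level 31x31. And so on.
--
--     See the `OpenGL wiki page on mipmaps <https://www.khronos.org/opengl/wiki/Texture#Mip_maps>`_ for more info.
--
--     :param dimensions: Size of the source source in pixels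
--     :param mip_count: Number of mipmap sizes to generate. By default, generate until the last mip level is 1x1.
--         Resulting mip chain will be smaller if a 1x1 mip level is reached before this value.
--     :return: A list of 2-tuples representing the dimensions of each mip level, including ``dimensions`` at element 0.
--     """
--     assert all([dim > 0 for dim in dimensions]), "Invalid source size"
--     if not mip_count:
--         mip_count = math.ceil(math.log2(max(dimensions)))  # maximum possible number of mips for a given source
--
--     assert mip_count > 0, "mip_count must be greater than 0"
--
--     chain = []
--
--     for mip in range(mip_count):
--         chain.append(dimensions)
--         dimensions = tuple([max(dim // 2, 1) for dim in dimensions])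
--
--         if all([dim == 1 for dim in dimensions]):
--             break  # we've reached a 1x1 mip and can get no smaller
--
--     return chain
-- ===== SOURCE B (Python) =====
-- import typing
-- import math
--
--
-- def mip_sizes(dimensions: typing.Tuple[int, int], mip_count: typing.Optional[int] = None) -> typing.List[typing.Tuple[int, int]]:
--     assert all([dim > 0 for dim in dimensions]), "Invalid source size"
--     if not mip_count:
--         mip_count = math.ceil(math.log2(max(dimensions)))
--
--     assert mip_count > 0, "mip_count must be greater than 0"
--
--     length = min(mip_count, max(1, max(dimensions).bit_length() - 1))
--     return [tuple(max(dim >> i, 1) for dim in dimensions) for i in range(length)]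
-- ===== Notes on version B (the rewrite author's own statement) =====
-- stated objective: simpler
-- what changed: Replaces the iterative halve-and-append loop (each level derived from the previous, with an early break at 1x1) by a closed-form chain length min(mip_count, max(1, max(dimensions).bit_length()-1)) and an independent right-shift computation of each mip level.
import Mathlib
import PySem

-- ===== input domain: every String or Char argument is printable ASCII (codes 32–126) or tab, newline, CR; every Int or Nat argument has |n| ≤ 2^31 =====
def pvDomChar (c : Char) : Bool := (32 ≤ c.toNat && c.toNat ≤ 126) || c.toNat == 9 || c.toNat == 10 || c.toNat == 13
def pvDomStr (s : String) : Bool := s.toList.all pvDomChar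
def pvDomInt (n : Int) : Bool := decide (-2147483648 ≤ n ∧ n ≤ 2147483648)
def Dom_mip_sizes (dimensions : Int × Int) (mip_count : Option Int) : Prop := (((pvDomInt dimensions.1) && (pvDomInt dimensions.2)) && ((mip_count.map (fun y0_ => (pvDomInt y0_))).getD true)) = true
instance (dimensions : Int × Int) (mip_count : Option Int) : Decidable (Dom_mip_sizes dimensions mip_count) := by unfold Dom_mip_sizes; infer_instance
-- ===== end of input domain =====

-- B replaces A's iterated-halving loop with a closed-form chain length and an independent
-- right-shift computation of each mip level (objective: simpler).


-- ===== PORT A =====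
-- math.ceil(math.log2 n) = bitLength (n-1): exact for integer 1 ≤ n ≤ 2^31 (doubles are exact enough there)
def pvCeilLog2 (n : Int) : Int := (PySem.Int.bitLength (n - 1) : Int)

-- `if not mip_count:` — None and 0 are falsy and trigger the default (identical lines in A and B)
def pvDefaultedMipCount (dimensions : Int × Int) (mip_count : Option Int) : Int :=
  match mip_count with
  | none => pvCeilLog2 (max dimensions.1 dimensions.2)
  | some m => if m = 0 then pvCeilLog2 (max dimensions.1 dimensions.2) else m

-- A's `for mip in range(mip_count)` loop with its early break after halving
def pvMipLoop : Nat → Int × Int → List (Int × Int)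
  | 0, _ => []
  | Nat.succ k, d =>
    d :: (if max (PySem.Int.floordiv d.1 2) 1 = 1 ∧ max (PySem.Int.floordiv d.2 2) 1 = 1
          then []
          else pvMipLoop k (max (PySem.Int.floordiv d.1 2) 1, max (PySem.Int.floordiv d.2 2) 1))

def mip_sizes (dimensions : Int × Int) (mip_count : Option Int) : List (Int × Int) :=
  pvMipLoop (pvDefaultedMipCount dimensions mip_count).toNat dimensions
  -- a non-positive defaulted mip_count means the assert raises: excluded by Pre_

-- ===== PORT B =====
def mip_sizes_alt (dimensions : Int × Int) (mip_count : Option Int) : List (Int × Int) :=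
  let length : Int :=
    min (pvDefaultedMipCount dimensions mip_count)
        (max 1 ((PySem.Int.bitLength (max dimensions.1 dimensions.2) : Int) - 1))
  (List.range length.toNat).map (fun (i : Nat) => (max (dimensions.1 >>> i) 1, max (dimensions.2 >>> i) 1))

-- ===== PRECONDITION & SPEC =====
-- Pre_ excludes exactly the inputs on which A raises AssertionError: a non-positive dimension,
-- an explicit mip_count < 0, or a falsy mip_count (None or 0) with a 1x1 source (default mip_count 0).
def Pre_mip_sizes (dimensions : Int × Int) (mip_count : Option Int) : Prop :=
  0 < dimensions.1 ∧ 0 < dimensions.2 ∧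
    (if mip_count.getD 0 = 0 then 2 ≤ max dimensions.1 dimensions.2 else 0 < mip_count.getD 0)
instance (dimensions : Int × Int) (mip_count : Option Int) : Decidable (Pre_mip_sizes dimensions mip_count) := by unfold Pre_mip_sizes; infer_instance

def pvWitness_mip_sizes : (Int × Int) × Option Int := ((13, 5), none)

def Spec_mip_sizes (dimensions : Int × Int) (mip_count : Option Int) (out : List (Int × Int)) : Prop := out = mip_sizes_alt dimensions mip_count
instance (dimensions : Int × Int) (mip_count : Option Int) (out : List (Int × Int)) : Decidable (Spec_mip_sizes dimensions mip_count out) := by unfold Spec_mip_sizes; infer_instance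

-- ===== CLAIM (what is proved, stated in full; the proofs are below) =====
def Claim_equal_mip_sizes : Prop := ∀ (dimensions : Int × Int) (mip_count : Option Int), Dom_mip_sizes dimensions mip_count → Pre_mip_sizes dimensions mip_count → Spec_mip_sizes dimensions mip_count (mip_sizes dimensions mip_count)

-- ===== LEMMAS AND PROOFS =====

theorem pv_bl_pos (n : Int) (h : n ≠ 0) : 1 ≤ PySem.Int.bitLength n := by
  by_contra hc
  have h2 := PySem.Int.lt_two_pow_bitLength n
  have h0 : PySem.Int.bitLength n = 0 := by omega
  rw [h0, pow_zero] at h2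
  omega

theorem pv_bl_ge_three (m : Int) (h : 4 ≤ m) : 3 ≤ PySem.Int.bitLength m := by
  by_contra hc
  have h2 := PySem.Int.lt_two_pow_bitLength m
  interval_cases hb : (PySem.Int.bitLength m) <;> omega

theorem pv_bl_le_two (m : Int) (h1 : 1 ≤ m) (h3 : m ≤ 3) : PySem.Int.bitLength m ≤ 2 := by
  by_contra hc
  have h2 := PySem.Int.two_pow_bitLength_le m (by omega)
  have h4 : (4:Nat) ≤ 2 ^ (PySem.Int.bitLength m - 1) := by
    calc (4:Nat) = 2 ^ 2 := by norm_num
    _ ≤ 2 ^ (PySem.Int.bitLength m - 1) := Nat.pow_le_pow_right (by norm_num) (by omega)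
  omega

theorem pv_shift_one (d : Int) : d >>> (1:Nat) = d / 2 := by
  simpa using @Int.shiftRight_eq_div_pow d 1

theorem pv_shift_succ (d : Int) (hd : 0 < d) (i : Nat) :
    max ((max (d / 2) 1) >>> i) 1 = max (d >>> (i + 1)) 1 := by
  by_cases h : 2 ≤ d
  · have h1 : (1:Int) ≤ d / 2 := by omega
    rw [max_eq_left h1, show i + 1 = 1 + i from Nat.add_comm i 1, Int.shiftRight_add d 1 i,
      pv_shift_one]
  · have hd1 : d = 1 := by omega
    subst hd1
    have e1 : (1:Int) >>> i = 1 / 2 ^ i := Int.shiftRight_eq_div_pow ..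
    have e2 : (1:Int) >>> (i + 1) = 1 / 2 ^ (i + 1) := Int.shiftRight_eq_div_pow ..
    have hp : (1:Int) / 2 ^ i ≤ 1 := Int.ediv_le_self _ (by norm_num)
    have hq : (0:Int) ≤ 1 / 2 ^ i := Int.ediv_nonneg (by norm_num) (by positivity)
    have hr : (1:Int) / 2 ^ (i + 1) = 0 := by
      apply Int.ediv_eq_zero_of_lt (by norm_num)
      calc (1:Int) < 2 ^ 1 := by norm_num
      _ ≤ 2 ^ (i + 1) := pow_le_pow_right₀ (by norm_num) (by omega)
    rw [show max ((1:Int)/2) 1 = 1 from by norm_num, e1, e2, hr]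
    omega

theorem pv_loop_eq (k : Nat) (d1 d2 : Int) (hp1 : 0 < d1) (hp2 : 0 < d2) :
    pvMipLoop k (d1, d2) =
      (List.range (min k (max 1 (PySem.Int.bitLength (max d1 d2) - 1)))).map
        (fun (i : Nat) => (max (d1 >>> i) 1, max (d2 >>> i) 1)) := by
  induction k generalizing d1 d2 with
  | zero => simp [pvMipLoop]
  | succ k ih =>
    have hf1 : PySem.Int.floordiv d1 2 = d1 / 2 := PySem.Int.floordiv_eq_ediv_of_pos (by omega)
    have hf2 : PySem.Int.floordiv d2 2 = d2 / 2 := PySem.Int.floordiv_eq_ediv_of_pos (by omega)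
    simp only [pvMipLoop, hf1, hf2]
    by_cases hc : max (d1 / 2) 1 = 1 ∧ max (d2 / 2) 1 = 1
    · have hd1 : d1 ≤ 3 := by omega
      have hd2 : d2 ≤ 3 := by omega
      have hbl : PySem.Int.bitLength (max d1 d2) ≤ 2 := pv_bl_le_two _ (by omega) (by omega)
      have hbl1 : 1 ≤ PySem.Int.bitLength (max d1 d2) := pv_bl_pos _ (by omega)
      have hN : min (k + 1) (max 1 (PySem.Int.bitLength (max d1 d2) - 1)) = 1 := by omega
      rw [if_pos hc, hN, show List.range 1 = [0] from rfl]
      simp only [List.map_cons, List.map_nil, Int.shiftRight_zero]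
      rw [max_eq_left (by omega : (1:Int) ≤ d1), max_eq_left (by omega : (1:Int) ≤ d2)]
    · have hm4 : 4 ≤ max d1 d2 := by omega
      have hbl3 : 3 ≤ PySem.Int.bitLength (max d1 d2) := pv_bl_ge_three _ hm4
      have hmax : max (max (d1 / 2) 1) (max (d2 / 2) 1) = max d1 d2 / 2 := by omega
      have hblrec :
          PySem.Int.bitLength (max d1 d2) = PySem.Int.bitLength (max d1 d2 / 2) + 1 := by
        have h := PySem.Int.bitLength_of_pos (n := max d1 d2) (by omega)
        rwa [PySem.Int.floordiv_eq_ediv_of_pos (by omega)] at h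
      rw [if_neg hc, ih (max (d1 / 2) 1) (max (d2 / 2) 1) (by omega) (by omega), hmax]
      have hNs : min (k + 1) (max 1 (PySem.Int.bitLength (max d1 d2) - 1)) =
          min k (max 1 (PySem.Int.bitLength (max d1 d2 / 2) - 1)) + 1 := by omega
      rw [hNs, List.range_succ_eq_map, List.map_cons, List.map_map]
      congr 1
      · rw [Int.shiftRight_zero, Int.shiftRight_zero,
          max_eq_left (by omega : (1:Int) ≤ d1), max_eq_left (by omega : (1:Int) ≤ d2)]
      · refine List.map_congr_left ?_
        intro i _
        simp only [Function.comp, Nat.succ_eq_add_one]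
        rw [pv_shift_succ d1 hp1 i, pv_shift_succ d2 hp2 i]

-- ===== VERDICT (by name: the statement is the Claim_ definition above) =====
theorem mip_sizes_spec : Claim_equal_mip_sizes := by
  intro dims mc _ hpre
  obtain ⟨a, b⟩ := dims
  obtain ⟨ha, hb, hrest⟩ := hpre
  have hMpos : 0 < pvDefaultedMipCount (a, b) mc := by
    cases mc with
    | none =>
      simp only [Option.getD_none, if_pos] at hrest
      simp only [pvDefaultedMipCount, pvCeilLog2]
      have hrest' : 2 ≤ max a b := hrest
      have h := pv_bl_pos (max a b - 1) (by omega)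
      omega
    | some m =>
      by_cases hm : m = 0
      · subst hm
        simp only [Option.getD_some, if_pos] at hrest
        simp only [pvDefaultedMipCount, if_pos, pvCeilLog2]
        have hrest' : 2 ≤ max a b := hrest
        have h := pv_bl_pos (max a b - 1) (by omega)
        omega
      · simp only [Option.getD_some, if_neg hm] at hrest
        simp only [pvDefaultedMipCount, if_neg hm]
        exact hrest
  simp only [Spec_mip_sizes, mip_sizes, mip_sizes_alt]
  rw [pv_loop_eq _ a b ha hb]
  have hlen : (min (pvDefaultedMipCount (a, b) mc)
        (max 1 ((PySem.Int.bitLength (max a b) : Int) - 1))).toNat =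
      min (pvDefaultedMipCount (a, b) mc).toNat
        (max 1 (PySem.Int.bitLength (max a b) - 1)) := by omega
  rw [hlen]
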